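-- pv_equiv track=rewrite | github.com/pypi-data/pypi-mirror-371 | packages/qkdpy/qkdpy-0.2.5.tar.gz/qkdpy-0.2.5/src/qkdpy/key_management/error_correction.py | winnow
-- ===== SOURCE A (Python) =====
-- def winnow(
--     alice_key: list[int],
--     bob_key: list[int],
--     block_size: int = 4,
--     iterations: int = 4,
-- ) -> tuple[list[int], list[int]]:
--     """Winnow error correction protocol.
--
--     Args:
--         alice_key: Alice's binary key
--         bob_key: Bob's binary key
--         block_size: Size of blocks for parity checks
--         iterations: Number of iterations of the protocol
--
--     Returns:
--         Tuple of corrected (alice_key, bob_key)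
--
--     """
--     if len(alice_key) != len(bob_key):
--         raise ValueError("Alice's and Bob's keys must have the same length")
--
--     # Make copies of the keys
--     alice_corrected = alice_key.copy()
--     bob_corrected = bob_key.copy()
--
--     # Keep track of which bits have been corrected
--     corrected_bits: set[int] = set()
--
--     for _iteration in range(iterations):
--         # Divide the key into blocks of the specified size
--         num_blocks = len(alice_corrected) // block_size
--
--         for i in range(num_blocks):
--             start = i * block_size
--             end = start + block_size
--
--             # Skip if this block contains a bit that was already corrected
--             if any(start <= bit < end for bit in corrected_bits):
--                 continue
--
--             # Calculate parity for the block
--             alice_parity = int(sum(alice_corrected[start:end]) % 2)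
--             bob_parity = int(sum(bob_corrected[start:end]) % 2)
--
--             # If parities don't match, find and correct the error
--             if alice_parity != bob_parity:
--                 # Binary search to find the error
--                 left = start
--                 right = end
--
--                 while right - left > 1:
--                     mid = (left + right) // 2
--
--                     alice_parity_left = int(sum(alice_corrected[left:mid]) % 2)
--                     bob_parity_left = int(sum(bob_corrected[left:mid]) % 2)
--
--                     if alice_parity_left != bob_parity_left:
--                         right = mid
--                     else:
--                         left = mid
--
--                 # Correct the error
--                 bob_corrected[left] = 1 - bob_corrected[left]
--                 corrected_bits.add(left)
--
--     return alice_corrected, bob_corrected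
-- ===== SOURCE B (Python) =====
-- def winnow(
--     alice_key: list[int],
--     bob_key: list[int],
--     block_size: int = 4,
--     iterations: int = 4,
-- ) -> tuple[list[int], list[int]]:
--     """Winnow error correction, re-implemented with prefix parities.
--
--     The parity comparisons of the original only depend on the bitwise
--     difference of the two keys, so we precompute prefix parities of that
--     difference once and answer every block/binary-search parity query in
--     O(1); corrected blocks are tracked by block index.
--     """
--     if len(alice_key) != len(bob_key):
--         raise ValueError("Alice's and Bob's keys must have the same length")
--
--     n = len(alice_key)
--     bob = list(bob_key)
--
--     # prefix parities of the bitwise difference of the two keys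
--     pref = [0]
--     for j in range(n):
--         pref.append(pref[j] ^ ((alice_key[j] - bob_key[j]) & 1))
--
--     done: set[int] = set()  # indices of blocks already corrected
--     if block_size > 0:
--         num_blocks = n // block_size
--         for _ in range(iterations):
--             for i in range(num_blocks):
--                 if i in done:
--                     continue
--                 start = i * block_size
--                 end = start + block_size
--                 if pref[start] != pref[end]:
--                     left, right = start, end
--                     while right - left > 1:
--                         mid = (left + right) // 2
--                         if pref[left] != pref[mid]:
--                             right = mid
--                         else:
--                             left = mid
--                     bob[left] = 1 - bob[left]
--                     done.add(i)
--
--     return list(alice_key), bob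
-- ===== Notes on version B (the rewrite author's own statement) =====
-- stated objective: faster
-- what changed: All parity queries (block checks and every binary-search step) are answered in O(1) from one precomputed prefix-parity array of the bitwise key difference instead of summing list slices each time, and corrected blocks are skipped by an O(1) block-index set lookup instead of scanning the whole corrected-bit set per block.
import Mathlib
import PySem

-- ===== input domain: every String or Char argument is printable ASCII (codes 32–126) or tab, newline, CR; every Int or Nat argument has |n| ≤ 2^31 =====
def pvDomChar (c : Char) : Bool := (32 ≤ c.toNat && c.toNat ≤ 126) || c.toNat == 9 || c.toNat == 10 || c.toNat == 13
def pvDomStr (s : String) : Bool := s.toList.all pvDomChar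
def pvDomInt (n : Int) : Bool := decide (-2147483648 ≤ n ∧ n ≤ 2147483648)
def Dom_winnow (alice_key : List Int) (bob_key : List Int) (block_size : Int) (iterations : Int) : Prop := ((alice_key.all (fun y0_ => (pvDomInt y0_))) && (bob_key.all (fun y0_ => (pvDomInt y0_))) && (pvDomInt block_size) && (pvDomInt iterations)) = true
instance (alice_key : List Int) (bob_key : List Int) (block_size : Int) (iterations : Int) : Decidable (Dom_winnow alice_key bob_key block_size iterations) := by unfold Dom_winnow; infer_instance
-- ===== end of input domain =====

-- B replaces A's repeated slice-summing and corrected-bit scans by one precomputed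
-- prefix-parity array of the key difference and a corrected-block-index set.

-- ===== PORT A =====
-- A's binary search: repeatedly compares slice-sum parities of the two keys.
-- The fuel argument is a totality guard only: each pass strictly shrinks right - left,
-- so starting with (right - left).toNat fuel the guard never changes the result.
def winnowSearchGo (alice bob : List Int) : Nat → Int → Int → Int
  | 0, left, _ => left
  | fuel + 1, left, right =>
    if 1 < right - left then
      let mid := PySem.Int.floordiv (left + right) 2
      let ap := PySem.Int.mod (PySem.List.slice alice (some left) (some mid)).sum 2
      let bp := PySem.Int.mod (PySem.List.slice bob (some left) (some mid)).sum 2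
      if ap ≠ bp then winnowSearchGo alice bob fuel left mid
      else winnowSearchGo alice bob fuel mid right
    else left

def winnowSearch (alice bob : List Int) (left right : Int) : Int :=
  winnowSearchGo alice bob (right - left).toNat left right

-- one block of A's inner loop; state = (bob_corrected, corrected_bits)
def winnowBlockStep (alice : List Int) (block_size : Int)
    (st : List Int × List Int) (i : Int) : List Int × List Int :=
  let start := i * block_size
  let end_ := start + block_size
  if st.2.any (fun bit => decide (start ≤ bit) && decide (bit < end_)) then st
  else
    let ap := PySem.Int.mod (PySem.List.slice alice (some start) (some end_)).sum 2
    let bp := PySem.Int.mod (PySem.List.slice st.1 (some start) (some end_)).sum 2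
    if ap ≠ bp then
      let left := winnowSearch alice st.1 start end_
      -- bob_corrected[left] = 1 - bob_corrected[left]; left is provably in range here,
      -- so pyGetD/pySetD are exact
      (PySem.List.pySetD st.1 left (1 - PySem.List.pyGetD st.1 left 0),
       PySem.Set.add st.2 left)
    else st

def winnow (alice_key : List Int) (bob_key : List Int) (block_size : Int) (iterations : Int) : List Int × List Int :=
  -- 'if len(alice_key) != len(bob_key): raise ValueError' — excluded by Pre_winnow,
  -- as is the ZeroDivisionError of '// block_size' when block_size = 0 and iterations ≥ 1
  let st := (PySem.List.pyRange 0 iterations 1).foldl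
    (fun st _ =>
      let num_blocks := PySem.Int.floordiv (alice_key.length : Int) block_size
      (PySem.List.pyRange 0 num_blocks 1).foldl (winnowBlockStep alice_key block_size) st)
    (bob_key, PySem.Set.empty)
  (alice_key, st.1)

-- ===== PORT B =====
-- B's binary search: O(1) parity queries on the prefix-parity array
-- (same fuel totality guard as in port A; it never changes the result)
def altSearchGo (pref : List Int) : Nat → Int → Int → Int
  | 0, left, _ => left
  | fuel + 1, left, right =>
    if 1 < right - left then
      let mid := PySem.Int.floordiv (left + right) 2
      if PySem.List.pyGetD pref left 0 ≠ PySem.List.pyGetD pref mid 0 then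
        altSearchGo pref fuel left mid
      else altSearchGo pref fuel mid right
    else left

def altSearch (pref : List Int) (left right : Int) : Int :=
  altSearchGo pref (right - left).toNat left right

-- one block of B's inner loop; state = (bob, done block indices)
def altBlockStep (pref : List Int) (block_size : Int)
    (st : List Int × List Int) (i : Int) : List Int × List Int :=
  if PySem.Set.contains st.2 i then st
  else
    let start := i * block_size
    let end_ := start + block_size
    if PySem.List.pyGetD pref start 0 ≠ PySem.List.pyGetD pref end_ 0 then
      let left := altSearch pref start end_
      -- bob[left] = 1 - bob[left]; left in range, so pyGetD/pySetD are exact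
      (PySem.List.pySetD st.1 left (1 - PySem.List.pyGetD st.1 left 0),
       PySem.Set.add st.2 i)
    else st

def winnow_alt (alice_key : List Int) (bob_key : List Int) (block_size : Int) (iterations : Int) : List Int × List Int :=
  let n : Int := (alice_key.length : Int)
  -- pref[k] = parity of the difference of the first k bits (indices in range: exact)
  let pref := (PySem.List.pyRange 0 n 1).foldl
    (fun pref j => pref ++ [PySem.Int.bxor (PySem.List.pyGetD pref j 0)
      (PySem.Int.band (PySem.List.pyGetD alice_key j 0 - PySem.List.pyGetD bob_key j 0) 1)])
    [0]
  let st :=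
    if 0 < block_size then
      let num_blocks := PySem.Int.floordiv n block_size
      (PySem.List.pyRange 0 iterations 1).foldl
        (fun st _ => (PySem.List.pyRange 0 num_blocks 1).foldl (altBlockStep pref block_size) st)
        (bob_key, PySem.Set.empty)
    else (bob_key, PySem.Set.empty)
  (alice_key, st.1)

-- ===== PRECONDITION & SPEC =====
-- Pre_ excludes exactly the inputs where A raises: unequal key lengths (ValueError) and
-- block_size = 0 with iterations ≥ 1 (ZeroDivisionError at '// block_size').
def Pre_winnow (alice_key : List Int) (bob_key : List Int) (block_size : Int) (iterations : Int) : Prop :=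
  alice_key.length = bob_key.length ∧ (block_size ≠ 0 ∨ iterations < 1)
instance (alice_key : List Int) (bob_key : List Int) (block_size : Int) (iterations : Int) : Decidable (Pre_winnow alice_key bob_key block_size iterations) := by unfold Pre_winnow; infer_instance

def pvWitness_winnow : List Int × List Int × Int × Int := ([0, 1, 1, 0], [0, 1, 0, 0], 2, 2)

def Spec_winnow (alice_key : List Int) (bob_key : List Int) (block_size : Int) (iterations : Int) (out : List Int × List Int) : Prop := out = winnow_alt alice_key bob_key block_size iterations
instance (alice_key : List Int) (bob_key : List Int) (block_size : Int) (iterations : Int) (out : List Int × List Int) : Decidable (Spec_winnow alice_key bob_key block_size iterations out) := by unfold Spec_winnow; infer_instance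

-- ===== CLAIM (what is proved, stated in full; the proofs are below) =====
def Claim_equal_winnow : Prop := ∀ (alice_key : List Int) (bob_key : List Int) (block_size : Int) (iterations : Int), Dom_winnow alice_key bob_key block_size iterations → Pre_winnow alice_key bob_key block_size iterations → Spec_winnow alice_key bob_key block_size iterations (winnow alice_key bob_key block_size iterations)

-- ===== LEMMAS AND PROOFS =====

def prefParity (a b0 : List Int) (k : Nat) : Int :=
  PySem.Int.mod ((a.take k).sum - (b0.take k).sum) 2

lemma mod2_bxor (w z : Int) :
    PySem.Int.bxor (PySem.Int.mod w 2) (PySem.Int.mod z 2) = PySem.Int.mod (w + z) 2 := by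
  simp only [PySem.Int.mod_eq_emod_of_pos (show (0:Int) < 2 by norm_num)]
  have hw : w % 2 = 0 ∨ w % 2 = 1 := by omega
  have hz : z % 2 = 0 ∨ z % 2 = 1 := by omega
  rcases hw with hw|hw <;> rcases hz with hz|hz <;> rw [hw, hz]
  · have h : (w + z) % 2 = 0 := by omega
    rw [h]; decide
  · have h : (w + z) % 2 = 1 := by omega
    rw [h]; decide
  · have h : (w + z) % 2 = 1 := by omega
    rw [h]; decide
  · have h : (w + z) % 2 = 0 := by omega
    rw [h]; decide

lemma sum_slice (xs : List Int) (s e : Nat) (hse : s ≤ e) :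
    (PySem.List.slice xs (some (s : Int)) (some (e : Int))).sum
      = (xs.take e).sum - (xs.take s).sum := by
  rw [PySem.List.slice_natCast]
  have h : xs.take e = xs.take s ++ (xs.drop s).take (e - s) := by
    conv_lhs => rw [show e = s + (e - s) by omega]
    rw [List.take_add]
  rw [h, List.sum_append]
  ring

lemma pref_get (a b0 : List Int) (i : Int) (h0 : 0 ≤ i) (h1 : i ≤ (a.length : Int)) :
    PySem.List.pyGetD ((List.range (a.length + 1)).map (prefParity a b0)) i 0
      = prefParity a b0 i.toNat := by
  rw [show i = ((i.toNat : Nat) : Int) from (Int.toNat_of_nonneg h0).symm,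
    PySem.List.pyGetD_natCast]
  have hlt : i.toNat < a.length + 1 := by omega
  simp [List.getD_eq_getElem?_getD, hlt]
  congr 1
  omega

lemma sum_take_succ (xs : List Int) (m : Nat) (h : m < xs.length) :
    (xs.take (m + 1)).sum = (xs.take m).sum + xs.getD m 0 := by
  rw [List.take_add_one, List.sum_append, List.getElem?_eq_getElem h]
  simp [List.getD_eq_getElem?_getD, List.getElem?_eq_getElem h]

lemma prefParity_succ (a b0 : List Int) (m : Nat) (ha : m < a.length) (hb : m < b0.length) :
    prefParity a b0 (m + 1) =
      PySem.Int.bxor (prefParity a b0 m) (PySem.Int.band (a.getD m 0 - b0.getD m 0) 1) := by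
  unfold prefParity
  rw [sum_take_succ a m ha, sum_take_succ b0 m hb, PySem.Int.band_one, mod2_bxor]
  ring_nf

lemma pref_spec_aux (a b0 : List Int) (hlen : a.length = b0.length) (m : Nat) (hm : m ≤ a.length) :
    (PySem.List.pyRange 0 (m : Int) 1).foldl
      (fun pref j => pref ++ [PySem.Int.bxor (PySem.List.pyGetD pref j 0)
        (PySem.Int.band (PySem.List.pyGetD a j 0 - PySem.List.pyGetD b0 j 0) 1)]) [0]
      = (List.range (m + 1)).map (prefParity a b0) := by
  induction m with
  | zero =>
      simp [PySem.List.pyRange_one_eq_nil, List.range_succ, prefParity]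
  | succ m ih =>
      have hm' : m ≤ a.length := by omega
      have hcast : ((m + 1 : Nat) : Int) = (m : Int) + 1 := by push_cast; ring
      rw [hcast, PySem.List.pyRange_one_succ_right (by positivity), List.foldl_append, ih hm']
      simp only [List.foldl_cons, List.foldl_nil]
      rw [show (List.range (m + 1 + 1)) = List.range (m + 1) ++ [m + 1] from List.range_succ,
        List.map_append]
      congr 1
      have h1 : PySem.List.pyGetD ((List.range (m + 1)).map (prefParity a b0)) (m : Int) 0
          = prefParity a b0 m := by
        rw [PySem.List.pyGetD_natCast]
        simp [List.getD_eq_getElem?_getD, Nat.lt_succ_of_le m.le_refl]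
      have h2 : PySem.List.pyGetD a (m : Int) 0 = a.getD m 0 := by
        rw [PySem.List.pyGetD_natCast]
      have h3 : PySem.List.pyGetD b0 (m : Int) 0 = b0.getD m 0 := by
        rw [PySem.List.pyGetD_natCast]
      rw [h1, h2, h3, List.map_singleton, ← prefParity_succ a b0 m (by omega) (by omega)]

lemma testA_iff (a b0 : List Int) (s e : Nat) (hse : s ≤ e) :
    (PySem.Int.mod (PySem.List.slice a (some (s:Int)) (some (e:Int))).sum 2 ≠
       PySem.Int.mod (PySem.List.slice b0 (some (s:Int)) (some (e:Int))).sum 2)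
      ↔ prefParity a b0 s ≠ prefParity a b0 e := by
  rw [sum_slice a s e hse, sum_slice b0 s e hse]
  unfold prefParity
  simp only [PySem.Int.mod_eq_emod_of_pos (show (0:Int) < 2 by norm_num)]
  omega

lemma slice_eq_of_pyGetD (xs ys : List Int) (hlen : xs.length = ys.length) (l m : Int)
    (h0 : 0 ≤ l) (hm : 0 ≤ m)
    (h : ∀ j : Int, l ≤ j → j < m → PySem.List.pyGetD xs j 0 = PySem.List.pyGetD ys j 0) :
    PySem.List.slice xs (some l) (some m) = PySem.List.slice ys (some l) (some m) := by
  simp only [PySem.List.slice_toNat, h0, hm]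
  apply List.ext_getElem
  · simp [hlen]
  · intro k h1 h2
    simp only [List.getElem_take, List.getElem_drop]
    have hk1 : l.toNat + k < xs.length := by
      simp [List.length_take, List.length_drop] at h1
      omega
    have hk2 : (↑(l.toNat + k) : Int) < m := by
      simp [List.length_take, List.length_drop] at h1
      omega
    have := h ((l.toNat + k : Nat) : Int) (by omega) hk2
    rw [PySem.List.pyGetD_natCast, PySem.List.pyGetD_natCast] at this
    simpa [List.getD_eq_getElem?_getD, List.getElem?_eq_getElem, hk1,
      show l.toNat + k < ys.length by omega] using this

lemma winnowSearchGo_mem (alice bob : List Int) (fuel : Nat) :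
    ∀ (l r : Int), l < r →
      l ≤ winnowSearchGo alice bob fuel l r ∧ winnowSearchGo alice bob fuel l r < r := by
  induction fuel with
  | zero => intro l r h; simp [winnowSearchGo]; omega
  | succ fuel ih =>
      intro l r h
      rw [winnowSearchGo]
      by_cases hlt : 1 < r - l
      · rw [if_pos hlt]
        have hm : l < PySem.Int.floordiv (l + r) 2 ∧ PySem.Int.floordiv (l + r) 2 < r := by
          rw [PySem.Int.floordiv_eq_ediv_of_pos (by omega : (0:Int) < 2)]
          omega
        by_cases hne : PySem.Int.mod (PySem.List.slice alice (some l)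
              (some (PySem.Int.floordiv (l + r) 2))).sum 2 ≠
            PySem.Int.mod (PySem.List.slice bob (some l)
              (some (PySem.Int.floordiv (l + r) 2))).sum 2
        · rw [if_pos hne]
          exact ⟨(ih l _ hm.1).1, lt_trans (ih l _ hm.1).2 hm.2⟩
        · rw [if_neg hne]
          exact ⟨le_trans (le_of_lt hm.1) (ih _ r hm.2).1, (ih _ r hm.2).2⟩
      · rw [if_neg hlt]; omega

lemma winnowSearch_mem (alice bob : List Int) (l r : Int) (h : l < r) :
    l ≤ winnowSearch alice bob l r ∧ winnowSearch alice bob l r < r :=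
  winnowSearchGo_mem alice bob (r - l).toNat l r h

lemma winnowSearchGo_eq (a b0 : List Int) (hab : a.length = b0.length) (bob : List Int)
    (hlen : bob.length = b0.length) (fuel : Nat) :
    ∀ (l r : Int), 0 ≤ l → r ≤ (a.length : Int) →
      (∀ j : Int, l ≤ j → j < r → PySem.List.pyGetD bob j 0 = PySem.List.pyGetD b0 j 0) →
      winnowSearchGo a bob fuel l r
        = altSearchGo ((List.range (a.length + 1)).map (prefParity a b0)) fuel l r := by
  induction fuel with
  | zero => intro l r _ _ _; rw [winnowSearchGo, altSearchGo]
  | succ fuel ih =>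
      intro l r h0 hr hbob
      rw [winnowSearchGo, altSearchGo]
      by_cases hlt : 1 < r - l
      · rw [if_pos hlt, if_pos hlt]
        set mid := PySem.Int.floordiv (l + r) 2 with hmid
        have hm : l < mid ∧ mid < r := by
          rw [hmid, PySem.Int.floordiv_eq_ediv_of_pos (by omega : (0:Int) < 2)]
          omega
        have hslice : PySem.List.slice bob (some l) (some mid)
            = PySem.List.slice b0 (some l) (some mid) :=
          slice_eq_of_pyGetD bob b0 (by omega) l mid h0 (by omega)
            (fun j hj1 hj2 => hbob j hj1 (by omega))
        have hiff : (PySem.Int.mod (PySem.List.slice a (some l) (some mid)).sum 2 ≠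
              PySem.Int.mod (PySem.List.slice bob (some l) (some mid)).sum 2)
            ↔ (PySem.List.pyGetD ((List.range (a.length + 1)).map (prefParity a b0)) l 0 ≠
              PySem.List.pyGetD ((List.range (a.length + 1)).map (prefParity a b0)) mid 0) := by
          rw [hslice, pref_get a b0 l h0 (by omega), pref_get a b0 mid (by omega) (by omega)]
          have := testA_iff a b0 l.toNat mid.toNat (by omega)
          rwa [Int.toNat_of_nonneg h0, Int.toNat_of_nonneg (by omega : (0:Int) ≤ mid)] at this
        by_cases hne : PySem.Int.mod (PySem.List.slice a (some l) (some mid)).sum 2 ≠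
            PySem.Int.mod (PySem.List.slice bob (some l) (some mid)).sum 2
        · rw [if_pos hne, if_pos (hiff.mp hne)]
          exact ih l mid h0 (by omega) (fun j hj1 hj2 => hbob j hj1 (by omega))
        · rw [if_neg hne, if_neg (fun hc => hne (hiff.mpr hc))]
          exact ih mid r (by omega) hr (fun j hj1 hj2 => hbob j (by omega) hj2)
      · rw [if_neg hlt, if_neg hlt]

lemma winnowSearch_eq (a b0 : List Int) (hab : a.length = b0.length) (bob : List Int)
    (hlen : bob.length = b0.length) (l r : Int) (h0 : 0 ≤ l) (hr : r ≤ (a.length : Int))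
    (hbob : ∀ j : Int, l ≤ j → j < r → PySem.List.pyGetD bob j 0 = PySem.List.pyGetD b0 j 0) :
    winnowSearch a bob l r
      = altSearch ((List.range (a.length + 1)).map (prefParity a b0)) l r :=
  winnowSearchGo_eq a b0 hab bob hlen (r - l).toNat l r h0 hr hbob

def InvW (b0 : List Int) (bs : Int) (st td : List Int × List Int) : Prop :=
  st.1 = td.1 ∧ st.1.length = b0.length ∧
  (∀ ℓ ∈ st.2, PySem.Int.floordiv ℓ bs ∈ td.2) ∧
  (∀ i ∈ td.2, ∃ ℓ ∈ st.2, i * bs ≤ ℓ ∧ ℓ < i * bs + bs) ∧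
  (∀ j : Int, 0 ≤ j → j < (b0.length : Int) → PySem.Int.floordiv j bs ∉ td.2 →
     PySem.List.pyGetD st.1 j 0 = PySem.List.pyGetD b0 j 0)

lemma pyGetD_pySetD_ne (xs : List Int) (L j v : Int) (hL : 0 ≤ L) (hj : 0 ≤ j)
    (hne : j ≠ L) :
    PySem.List.pyGetD (PySem.List.pySetD xs L v) j 0 = PySem.List.pyGetD xs j 0 := by
  simp only [PySem.List.pySetD_of_nonneg, hL]
  rw [show j = ((j.toNat : Nat) : Int) from (Int.toNat_of_nonneg hj).symm,
      PySem.List.pyGetD_natCast, PySem.List.pyGetD_natCast]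
  simp only [List.getD_eq_getElem?_getD]
  rw [List.getElem?_set_ne (by omega)]

lemma blockStep_rel (a b0 : List Int) (bs : Int) (hab : a.length = b0.length) (hbs : 0 < bs)
    (i : Int) (hi0 : 0 ≤ i) (hi : i < PySem.Int.floordiv (a.length : Int) bs)
    (st td : List Int × List Int) (h : InvW b0 bs st td) :
    InvW b0 bs (winnowBlockStep a bs st i)
      (altBlockStep ((List.range (a.length + 1)).map (prefParity a b0)) bs td i) := by
  obtain ⟨hbob, hlen, hAB, hBA, huntouched⟩ := h
  have hnb : (PySem.Int.floordiv (a.length : Int) bs) * bs ≤ (a.length : Int) := by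
    have h1 := PySem.Int.floordiv_mul_add_mod (a.length : Int) bs
    have h2 := PySem.Int.mod_nonneg (a.length : Int) hbs
    omega
  have hs0 : 0 ≤ i * bs := mul_nonneg hi0 (le_of_lt hbs)
  have he : i * bs + bs ≤ (a.length : Int) := by
    have h3 : (i + 1) * bs ≤ (PySem.Int.floordiv (a.length : Int) bs) * bs :=
      mul_le_mul_of_nonneg_right (by omega) (le_of_lt hbs)
    have h4 : (i + 1) * bs = i * bs + bs := by ring
    omega
  have hfd : ∀ ℓ : Int, i * bs ≤ ℓ → ℓ < i * bs + bs → PySem.Int.floordiv ℓ bs = i := by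
    intro ℓ h1 h2
    rw [PySem.Int.floordiv_eq_iff_of_pos hbs]
    have h4 : (i + 1) * bs = i * bs + bs := by ring
    omega
  have hskip : (∃ bit ∈ st.2, i * bs ≤ bit ∧ bit < i * bs + bs) ↔ i ∈ td.2 := by
    constructor
    · rintro ⟨bit, hbit, hb1, hb2⟩
      have := hAB bit hbit
      rwa [hfd bit hb1 hb2] at this
    · intro hmem
      obtain ⟨ℓ, hℓ, h1, h2⟩ := hBA i hmem
      exact ⟨ℓ, hℓ, h1, h2⟩
  have hanyiff : (st.2.any (fun bit => decide (i * bs ≤ bit) && decide (bit < i * bs + bs))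
      = true) ↔ i ∈ td.2 := by
    rw [List.any_eq_true]
    simp only [Bool.and_eq_true, decide_eq_true_eq]
    exact hskip
  simp only [winnowBlockStep, altBlockStep]
  by_cases hmem : i ∈ td.2
  · have hcont : PySem.Set.contains td.2 i = true := by rwa [PySem.Set.contains_iff]
    rw [if_pos (hanyiff.mpr hmem), if_pos hcont]
    exact ⟨hbob, hlen, hAB, hBA, huntouched⟩
  · have hcont : ¬ (PySem.Set.contains td.2 i = true) := by
      rw [PySem.Set.contains_iff]; exact hmem
    rw [if_neg (fun hc => hmem (hanyiff.mp hc)), if_neg hcont]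
    have hpt : ∀ j : Int, i * bs ≤ j → j < i * bs + bs →
        PySem.List.pyGetD st.1 j 0 = PySem.List.pyGetD b0 j 0 := by
      intro j h1 h2
      exact huntouched j (by omega) (by omega) (by rw [hfd j h1 h2]; exact hmem)
    have hslice : PySem.List.slice st.1 (some (i * bs)) (some (i * bs + bs))
        = PySem.List.slice b0 (some (i * bs)) (some (i * bs + bs)) :=
      slice_eq_of_pyGetD st.1 b0 hlen (i * bs) (i * bs + bs) hs0 (by omega) hpt
    have htiff : (PySem.Int.mod (PySem.List.slice a (some (i*bs)) (some (i*bs+bs))).sum 2 ≠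
          PySem.Int.mod (PySem.List.slice st.1 (some (i*bs)) (some (i*bs+bs))).sum 2)
        ↔ (PySem.List.pyGetD ((List.range (a.length + 1)).map (prefParity a b0)) (i*bs) 0 ≠
          PySem.List.pyGetD ((List.range (a.length + 1)).map (prefParity a b0)) (i*bs+bs) 0) := by
      rw [hslice, pref_get a b0 (i*bs) hs0 (by omega), pref_get a b0 (i*bs+bs) (by omega) he]
      have := testA_iff a b0 (i*bs).toNat (i*bs+bs).toNat (by omega)
      rwa [Int.toNat_of_nonneg hs0, Int.toNat_of_nonneg (by omega)] at this
    by_cases htest : PySem.List.pyGetD ((List.range (a.length + 1)).map (prefParity a b0)) (i*bs) 0 ≠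
          PySem.List.pyGetD ((List.range (a.length + 1)).map (prefParity a b0)) (i*bs+bs) 0
    · rw [if_pos (htiff.mpr htest), if_pos htest]
      have hleft : winnowSearch a st.1 (i*bs) (i*bs+bs)
          = altSearch ((List.range (a.length + 1)).map (prefParity a b0)) (i*bs) (i*bs+bs) :=
        winnowSearch_eq a b0 hab st.1 hlen (i*bs) (i*bs+bs) hs0 he hpt
      have hlb := winnowSearch_mem a st.1 (i*bs) (i*bs+bs) (by omega)
      have hfdL : PySem.Int.floordiv (winnowSearch a st.1 (i*bs) (i*bs+bs)) bs = i :=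
        hfd _ hlb.1 hlb.2
      refine ⟨?_, ?_, ?_, ?_, ?_⟩
      · rw [← hbob, ← hleft]
      · rw [PySem.List.length_pySetD]; exact hlen
      · intro ℓ hℓ
        rw [PySem.Set.mem_add] at hℓ
        rcases hℓ with hℓ | hℓ
        · exact (PySem.Set.mem_add _ _ _).mpr (Or.inl (hAB ℓ hℓ))
        · subst hℓ
          exact (PySem.Set.mem_add _ _ _).mpr (Or.inr (by rw [hfdL]))
      · intro i' hi'
        rw [PySem.Set.mem_add] at hi'
        rcases hi' with hi' | hi'
        · obtain ⟨ℓ, hℓ, hb1, hb2⟩ := hBA i' hi'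
          exact ⟨ℓ, (PySem.Set.mem_add _ _ _).mpr (Or.inl hℓ), hb1, hb2⟩
        · subst hi'
          exact ⟨winnowSearch a st.1 (i'*bs) (i'*bs+bs),
            (PySem.Set.mem_add _ _ _).mpr (Or.inr rfl), hlb.1, hlb.2⟩
      · intro j hj0 hjn hjnot
        rw [PySem.Set.mem_add] at hjnot
        push Not at hjnot
        have hjneq : j ≠ winnowSearch a st.1 (i*bs) (i*bs+bs) := by
          intro hc
          exact hjnot.2 (by rw [hc, hfdL])
        rw [pyGetD_pySetD_ne st.1 _ j _ (by omega) hj0 hjneq]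
        exact huntouched j hj0 hjn hjnot.1
    · rw [if_neg (fun hc => htest (htiff.mp hc)), if_neg htest]
      exact ⟨hbob, hlen, hAB, hBA, huntouched⟩

lemma foldl_rel {σ τ ι : Type} (R : σ → τ → Prop) (f : σ → ι → σ) (g : τ → ι → τ)
    (L : List ι) (s : σ) (t : τ) (h : R s t)
    (hstep : ∀ i ∈ L, ∀ s' t', R s' t' → R (f s' i) (g t' i)) :
    R (L.foldl f s) (L.foldl g t) := by
  induction L generalizing s t with
  | nil => exact h
  | cons x xs ih =>
      exact ih _ _ (hstep x (by simp) s t h) (fun i hi => hstep i (by simp [hi]))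

lemma foldl_const_id {σ ι : Type} (L : List ι) (s : σ) :
    L.foldl (fun s _ => s) s = s := by
  induction L generalizing s with
  | nil => rfl
  | cons x xs ih => simp [ih]

theorem winnow_main (a b0 : List Int) (bs it : Int) (hlen : a.length = b0.length)
    (hpre2 : bs ≠ 0 ∨ it < 1) :
    winnow a b0 bs it = winnow_alt a b0 bs it := by
  simp only [winnow, winnow_alt]
  rw [pref_spec_aux a b0 hlen a.length le_rfl]
  by_cases hbs : 0 < bs
  · rw [if_pos hbs]
    have hrel := foldl_rel (InvW b0 bs)
      (fun st _ => (PySem.List.pyRange 0 (PySem.Int.floordiv (a.length : Int) bs) 1).foldl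
        (winnowBlockStep a bs) st)
      (fun st _ => (PySem.List.pyRange 0 (PySem.Int.floordiv (a.length : Int) bs) 1).foldl
        (altBlockStep ((List.range (a.length + 1)).map (prefParity a b0)) bs) st)
      (PySem.List.pyRange 0 it 1) (b0, PySem.Set.empty) (b0, PySem.Set.empty)
      ⟨rfl, hlen ▸ rfl, by simp [PySem.Set.empty], by simp [PySem.Set.empty], fun _ _ _ _ => rfl⟩
      (fun x _ s' t' h' =>
        foldl_rel (InvW b0 bs) (winnowBlockStep a bs)
          (altBlockStep ((List.range (a.length + 1)).map (prefParity a b0)) bs)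
          (PySem.List.pyRange 0 (PySem.Int.floordiv (a.length : Int) bs) 1) s' t' h'
          (fun i hi s'' t'' h'' =>
            blockStep_rel a b0 bs hlen hbs i
              ((PySem.List.mem_pyRange_one).mp hi).1
              ((PySem.List.mem_pyRange_one).mp hi).2 s'' t'' h''))
    rw [hrel.1]
  · rw [if_neg hbs]
    rcases hpre2 with hbs0 | hit
    · -- bs < 0 (bs = 0 is also handled below when it < 1 fails? no: here bs ≠ 0 so bs < 0)
      have hbsneg : bs < 0 := by omega
      have hnb : PySem.Int.floordiv (a.length : Int) bs ≤ 0 := by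
        have h1 := PySem.Int.floordiv_mul_add_mod (a.length : Int) bs
        have h2 := PySem.Int.mod_neg_bounds (a.length : Int) hbsneg
        by_contra hc
        push Not at hc
        have h5 : (0:Int) ≤ (a.length : Int) := by positivity
        have h6 : 0 ≤ (PySem.Int.floordiv (a.length : Int) bs - 1) * (-bs) :=
          mul_nonneg (by omega) (by omega)
        nlinarith [h1, h2.1, h2.2, h6, h5]
      simp only [PySem.List.pyRange_one_eq_nil hnb, List.foldl_nil, foldl_const_id]
    · rw [PySem.List.pyRange_one_eq_nil (show it ≤ 0 by omega)]
      simp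

-- ===== VERDICT (by name: the statement is the Claim_ definition above) =====
theorem winnow_spec : Claim_equal_winnow := by
  intro alice_key bob_key block_size iterations _hdom hpre
  unfold Spec_winnow
  exact winnow_main alice_key bob_key block_size iterations hpre.1 hpre.2
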